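-- pv_equiv track=rewrite | github.com/Rai220/anima | epoch_2/generation_1/minimal_break.py | first_column
-- ===== SOURCE A (Python) =====
-- def abs_diff_row(row):
--     return [abs(row[i+1] - row[i]) for i in range(len(row) - 1)]
--
-- def first_column(seq, depth):
--     """Возвращает первый элемент каждой строки abs-diff треугольника."""
--     firsts = [seq[0]]
--     row = seq[:]
--     for d in range(depth):
--         if len(row) < 2:
--             break
--         row = abs_diff_row(row)
--         firsts.append(row[0])
--     return firsts
-- ===== SOURCE B (Python) =====
-- def first_column(seq, depth):
--     # Only the first min(depth, len(seq)-1)+1 elements can influence the answer: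
--     # work on that prefix, shrinking it by one each level via zip of adjacent pairs.
--     steps = min(depth, len(seq) - 1)
--     if steps < 0:
--         steps = 0
--     pre = seq[:steps + 1]
--     out = [pre[0]]
--     while len(pre) > 1:
--         pre = [abs(y - x) for x, y in zip(pre, pre[1:])]
--         out.append(pre[0])
--     return out
-- ===== Notes on version B (the rewrite author's own statement) =====
-- stated objective: faster
-- what changed: B truncates seq to the only prefix (length min(depth, len(seq)-1)+1) that can influence the output and shrinks that prefix one element per level with a while-loop over zipped adjacent pairs, instead of A's counted loop recomputing the full abs-diff row of the whole sequence at every level.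
-- outside the precondition, e.g. on first_column([], 0): A raises IndexError, B raises IndexError
import Mathlib
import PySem

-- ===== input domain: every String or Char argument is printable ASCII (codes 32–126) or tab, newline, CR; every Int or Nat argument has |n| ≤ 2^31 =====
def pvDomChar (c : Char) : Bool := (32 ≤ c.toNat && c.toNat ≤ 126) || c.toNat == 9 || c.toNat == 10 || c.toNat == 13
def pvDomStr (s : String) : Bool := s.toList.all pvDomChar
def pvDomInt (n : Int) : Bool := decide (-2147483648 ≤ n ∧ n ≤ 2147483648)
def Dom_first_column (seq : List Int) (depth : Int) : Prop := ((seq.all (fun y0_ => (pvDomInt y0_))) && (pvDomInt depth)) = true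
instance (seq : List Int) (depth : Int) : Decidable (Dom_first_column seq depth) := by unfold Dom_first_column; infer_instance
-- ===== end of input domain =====

-- B computes only the prefix of length min(depth, len(seq)-1)+1 that can influence
-- the answer, shrinking it one element per level: O(min(n,depth)^2) vs A's O(n*min(n,depth)).


-- ===== PORT A =====
-- [abs(row[i+1] - row[i]) for i in range(len(row) - 1)]
-- (indices i and i+1 are always in range for i in range(len(row)-1), so pyGetD's default is never used)
def abs_diff_row (row : List Int) : List Int :=
  (PySem.List.pyRange 0 ((row.length : Int) - 1) 1).map
    (fun i => |PySem.List.pyGetD row (i + 1) 0 - PySem.List.pyGetD row i 0|)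

-- for d in range(depth): if len(row) < 2: break; row = abs_diff_row(row); firsts.append(row[0])
def firstColLoop : Nat → List Int → List Int → List Int
  | 0, _, firsts => firsts
  | n + 1, row, firsts =>
    if row.length < 2 then firsts
    else
      let r := abs_diff_row row
      firstColLoop n r (firsts ++ [PySem.List.pyGetD r 0 0])

-- seq[0] raises IndexError on empty seq (excluded by Pre_); pyGetD is exact there
def first_column (seq : List Int) (depth : Int) : List Int :=
  firstColLoop depth.toNat seq [PySem.List.pyGetD seq 0 0]

-- ===== PORT B =====
-- [abs(y - x) for x, y in zip(pre, pre[1:])]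
def bRow (pre : List Int) : List Int :=
  (pre.zip (PySem.List.slice pre (some 1) none)).map (fun p => |p.2 - p.1|)

-- while len(pre) > 1: pre = bRow(pre); out.append(pre[0])
def bLoop (pre out : List Int) : List Int :=
  if 1 < pre.length then
    let p := bRow pre
    bLoop p (out ++ [PySem.List.pyGetD p 0 0])
  else out
termination_by pre.length
decreasing_by
  have h1 : PySem.List.slice pre (some 1) none = pre.drop 1 := by
    rw [show (1 : Int) = ((1 : Nat) : Int) from rfl, PySem.List.slice_from_natCast]
  simp only [bRow, h1, List.length_map, List.length_zip, List.length_drop]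
  omega

def first_column_alt (seq : List Int) (depth : Int) : List Int :=
  let steps := max 0 (min depth ((seq.length : Int) - 1))
  let pre := PySem.List.slice seq none (some (steps + 1))
  bLoop pre [PySem.List.pyGetD pre 0 0]

-- ===== PRECONDITION & SPEC =====
-- A evaluates seq[0] unconditionally, so it raises IndexError exactly on empty seq.
def Pre_first_column (seq : List Int) (depth : Int) : Prop := seq ≠ []
instance (seq : List Int) (depth : Int) : Decidable (Pre_first_column seq depth) := by
  unfold Pre_first_column; infer_instance
def pvWitness_first_column : List Int × Int := ([3, 1, 4, 1, 5], 3)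

def Spec_first_column (seq : List Int) (depth : Int) (out : List Int) : Prop := out = first_column_alt seq depth
instance (seq : List Int) (depth : Int) (out : List Int) : Decidable (Spec_first_column seq depth out) := by unfold Spec_first_column; infer_instance

-- ===== CLAIM (what is proved, stated in full; the proofs are below) =====
def Claim_equal_first_column : Prop := ∀ (seq : List Int) (depth : Int), Dom_first_column seq depth → Pre_first_column seq depth → Spec_first_column seq depth (first_column seq depth)

-- ===== LEMMAS AND PROOFS =====

-- reference form of one abs-diff level
def absRow (xs : List Int) : List Int := List.zipWith (fun x y => |y - x|) xs xs.tail

-- reference list of the first elements of the next k rows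
def RL : Nat → List Int → List Int
  | 0, _ => []
  | k + 1, xs => (absRow xs).getD 0 0 :: RL k (absRow xs)

theorem absRow_length (xs : List Int) : (absRow xs).length = xs.length - 1 := by
  simp [absRow]

theorem map_zip_eq_zipWith (xs ys : List Int) :
    (xs.zip ys).map (fun p => |p.2 - p.1|) = List.zipWith (fun x y => |y - x|) xs ys := by
  induction xs generalizing ys with
  | nil => simp
  | cons x t ih => cases ys <;> simp [ih]

theorem abs_diff_row_eq (row : List Int) : abs_diff_row row = absRow row := by
  cases row with
  | nil => simp [abs_diff_row, absRow, PySem.List.pyRange]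
  | cons x t =>
    unfold abs_diff_row
    rw [show (((x :: t).length : Int) - 1) = ((t.length : Nat) : Int) by simp,
      PySem.List.pyRange_zero_natCast]
    apply List.ext_getElem
    · simp [absRow]
    · intro i h1 h2
      simp only [List.getElem_map, List.getElem_range, List.length_map, List.length_range] at h1 ⊢
      rw [show ((i : Int) + 1) = (((i + 1 : Nat)) : Int) by push_cast; ring]
      rw [PySem.List.pyGetD_natCast, PySem.List.pyGetD_natCast]
      have hi : i < t.length := by simpa using h1
      have hx : i < (x :: t).length := by simp; omega
      simp [absRow, List.getD, hi]
      rw [List.getElem?_eq_getElem hx]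
      simp

theorem bRow_eq (pre : List Int) : bRow pre = absRow pre := by
  unfold bRow absRow
  rw [show (1 : Int) = ((1 : Nat) : Int) from rfl, PySem.List.slice_from_natCast]
  rw [map_zip_eq_zipWith, List.drop_one]

theorem absRow_cons_cons (x y : Int) (t : List Int) :
    absRow (x :: y :: t) = |y - x| :: absRow (y :: t) := rfl

theorem absRow_take (k : Nat) (xs : List Int) :
    absRow (xs.take (k + 1)) = (absRow xs).take k := by
  induction xs generalizing k with
  | nil => simp [absRow]
  | cons x t ih =>
    cases k with
    | zero => cases t <;> simp [absRow]
    | succ j =>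
      cases t with
      | nil => simp [absRow]
      | cons y u =>
        simp only [List.take_succ_cons, absRow_cons_cons] at *
        rw [ih]

theorem getD_take_zero (k : Nat) (xs : List Int) :
    (xs.take (k + 1)).getD 0 0 = xs.getD 0 0 := by
  cases xs <;> simp

theorem RL_take (k : Nat) (xs : List Int) : RL k (xs.take (k + 1)) = RL k xs := by
  induction k generalizing xs with
  | zero => rfl
  | succ j ih =>
    simp only [RL]
    rw [show j + 1 + 1 = (j + 1) + 1 from rfl, absRow_take (j + 1) xs]
    rw [getD_take_zero j (absRow xs), ih (absRow xs)]

theorem firstColLoop_eq (fuel : Nat) (row acc : List Int) :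
    firstColLoop fuel row acc = acc ++ RL (min fuel (row.length - 1)) row := by
  induction fuel generalizing row acc with
  | zero => simp [firstColLoop, RL]
  | succ n ih =>
    simp only [firstColLoop]
    by_cases h : row.length < 2
    · rw [if_pos h, show min (n + 1) (row.length - 1) = 0 by omega]
      simp [RL]
    · rw [if_neg h]
      rw [ih, abs_diff_row_eq]
      rw [show min (n + 1) (row.length - 1)
            = (min n ((absRow row).length - 1)) + 1 by rw [absRow_length]; omega]
      simp only [RL, PySem.List.pyGetD_zero]
      simp [List.append_assoc]

theorem bLoop_eq (pre out : List Int) : bLoop pre out = out ++ RL (pre.length - 1) pre := by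
  by_cases h : 1 < pre.length
  · rw [bLoop.eq_def, if_pos h, bRow_eq]
    have hlen : (absRow pre).length = pre.length - 1 := absRow_length pre
    have hrec := bLoop_eq (absRow pre) (out ++ [PySem.List.pyGetD (absRow pre) 0 0])
    show bLoop (absRow pre) (out ++ [PySem.List.pyGetD (absRow pre) 0 0])
      = out ++ RL (pre.length - 1) pre
    rw [hrec, hlen]
    rw [show pre.length - 1 = (pre.length - 1 - 1) + 1 by omega]
    simp only [RL, PySem.List.pyGetD_zero]
    simp [List.append_assoc]
  · rw [bLoop.eq_def, if_neg h, show pre.length - 1 = 0 by omega]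
    simp [RL]
termination_by pre.length
decreasing_by
  simp only [absRow_length]; omega

-- ===== VERDICT (by name: the statement is the Claim_ definition above) =====
theorem first_column_spec : Claim_equal_first_column := by
  intro seq depth _ hpre
  unfold Spec_first_column first_column
  simp only [first_column_alt]
  have hn : 1 ≤ seq.length := by
    cases seq with
    | nil => exact absurd rfl hpre
    | cons a t => simp
  set s : Nat := min depth.toNat (seq.length - 1) with hs
  have hsteps : max 0 (min depth ((seq.length : Int) - 1)) = (s : Int) := by
    simp only [hs]; omega
  rw [hsteps]
  rw [show ((s : Int) + 1) = (((s + 1 : Nat)) : Int) by push_cast; ring,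
    PySem.List.slice_to_natCast]
  rw [firstColLoop_eq, bLoop_eq]
  have hlen : (seq.take (s + 1)).length = s + 1 := by
    simp; omega
  rw [hlen]
  simp only [Nat.add_sub_cancel]
  rw [RL_take s seq]
  rw [show min depth.toNat (seq.length - 1) = s from rfl]
  congr 1
  simp only [PySem.List.pyGetD_zero]
  rw [getD_take_zero s seq]
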